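-- pv_equiv track=rewrite | github.com/Preyash1808/design-agent-simulator-ui | archive/backend-2025-10-20/scripts/simulate_user_traversal.py | compute_distances_to_target
-- ===== SOURCE A (Python) =====
-- from typing import Dict, Any, List, Tuple, Optional
--
-- def compute_distances_to_target(edges_by_source_id: Dict[int, List[Dict[str, Any]]], start_ids: List[int], target_id: Optional[int]) -> Dict[int, int]:
--     if target_id is None:
--         return {}
--     # Build reverse adjacency for BFS from target
--     rev: Dict[int, List[int]] = {}
--     for src, arr in edges_by_source_id.items():
--         for e in arr:
--             did = e.get('_dest_id') if isinstance(e.get('_dest_id'), int) else None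
--             if isinstance(did, int):
--                 rev.setdefault(did, []).append(src)
--     from collections import deque
--     dist: Dict[int, int] = {int(target_id): 0}
--     dq = deque([int(target_id)])
--     while dq:
--         u = dq.popleft()
--         for v in rev.get(u, []):
--             if v not in dist:
--                 dist[v] = dist[u] + 1
--                 dq.append(v)
--     return dist
-- ===== SOURCE B (Python) =====
-- from typing import Dict, Any, List, Optional
--
-- def compute_distances_to_target(edges_by_source_id: Dict[int, List[Dict[str, Any]]], start_ids: List[int], target_id: Optional[int]) -> Dict[int, int]:
--     if target_id is None:
--         return {}
--     # No reverse adjacency is built: each level's predecessors are found by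
--     # rescanning the raw edge table (index-free, level-synchronous BFS).
--     dist: Dict[int, int] = {int(target_id): 0}
--     frontier: List[int] = [int(target_id)]
--     depth = 0
--     while frontier:
--         nxt: List[int] = []
--         for u in frontier:
--             for src, arr in edges_by_source_id.items():
--                 for e in arr:
--                     did = e.get('_dest_id')
--                     if isinstance(did, int) and did == u and src not in dist:
--                         dist[src] = depth + 1
--                         nxt.append(src)
--         frontier = nxt
--         depth += 1
--     return dist
-- ===== Notes on version B (the rewrite author's own statement) =====
-- stated objective: alternative
-- what changed: B builds no reverse-adjacency index at all: a level-synchronous BFS finds each level's predecessors by rescanning the raw edge table per frontier node (trading A's precomputed reverse graph and FIFO deque for index-free repeated scans with an explicit depth counter).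
import Mathlib
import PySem

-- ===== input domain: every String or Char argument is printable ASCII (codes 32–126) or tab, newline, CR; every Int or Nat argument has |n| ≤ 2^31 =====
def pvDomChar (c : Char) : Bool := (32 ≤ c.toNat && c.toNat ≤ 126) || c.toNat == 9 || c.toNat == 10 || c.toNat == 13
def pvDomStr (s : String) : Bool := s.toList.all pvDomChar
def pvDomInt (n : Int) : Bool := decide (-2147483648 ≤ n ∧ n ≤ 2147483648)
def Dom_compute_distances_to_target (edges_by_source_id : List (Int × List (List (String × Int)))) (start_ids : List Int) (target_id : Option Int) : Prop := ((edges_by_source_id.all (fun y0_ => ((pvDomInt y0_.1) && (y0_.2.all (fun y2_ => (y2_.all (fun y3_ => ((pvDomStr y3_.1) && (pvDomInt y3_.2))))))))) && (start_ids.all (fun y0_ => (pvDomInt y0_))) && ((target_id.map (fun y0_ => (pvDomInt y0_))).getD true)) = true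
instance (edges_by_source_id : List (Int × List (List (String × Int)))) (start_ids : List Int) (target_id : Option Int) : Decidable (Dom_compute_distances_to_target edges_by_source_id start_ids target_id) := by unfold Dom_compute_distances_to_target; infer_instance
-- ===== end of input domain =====

-- B builds no reverse-adjacency index: a level-synchronous BFS finds each level's predecessors by rescanning the raw edge table (objective: alternative; not faster).

-- e.get('_dest_id')  (values are typed Int, so 'isinstance(..., int)' always holds when the key is present)
def pvDest (e : List (String × Int)) : Option Int := (PySem.Dict.mk e).get? "_dest_id"

-- ===== PORT A =====
-- reverse adjacency: rev.setdefault(did, []).append(src)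
def pvRev (edges_by_source_id : List (Int × List (List (String × Int)))) : PySem.Dict Int (List Int) :=
  edges_by_source_id.foldl (fun rev p =>
    p.2.foldl (fun rev e =>
      match pvDest e with
      | some did => rev.modify did [] (fun l => l ++ [p.1])
      | none => rev) rev) PySem.Dict.empty

-- the `while dq` loop; fuel is only a termination guard (chosen provably sufficient at the call site);
-- dist[u] is read with getD: u is always a key of dist when popped, so this is exact
def pvBFSA (rev : PySem.Dict Int (List Int)) : Nat → List Int → PySem.Dict Int Int → PySem.Dict Int Int
  | _, [], dist => dist
  | 0, _ :: _, dist => dist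
  | fuel+1, u :: dq, dist =>
      let s := (rev.getD u []).foldl
        (fun (s : PySem.Dict Int Int × List Int) v =>
          if (s.1.get? v).isNone then (s.1.insert v (s.1.getD u 0 + 1), s.2 ++ [v]) else s)
        (dist, dq)
      pvBFSA rev fuel s.2 s.1

def compute_distances_to_target (edges_by_source_id : List (Int × List (List (String × Int)))) (start_ids : List Int) (target_id : Option Int) : List (Int × Int) :=
  match target_id with
  | none => []
  | some t =>
      let rev := pvRev edges_by_source_id
      let dist : PySem.Dict Int Int := PySem.Dict.empty.insert t 0
      (pvBFSA rev (1 + edges_by_source_id.length) [t] dist).items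

-- ===== PORT B =====
-- the scan `for src, arr in edges_by_source_id.items(): for e in arr: …` for one frontier node u
def pvScanB (edges_by_source_id : List (Int × List (List (String × Int)))) (depth : Int) (u : Int)
    (s : PySem.Dict Int Int × List Int) : PySem.Dict Int Int × List Int :=
  edges_by_source_id.foldl (fun s p =>
    p.2.foldl (fun (s : PySem.Dict Int Int × List Int) e =>
      match pvDest e with
      | some did =>
          if did = u then
            (if (s.1.get? p.1).isNone then (s.1.insert p.1 (depth + 1), s.2 ++ [p.1]) else s)
          else s
      | none => s) s) s

-- the `while frontier` level loop; fuel is only a termination guard (chosen provably sufficient at the call site)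
def pvBFSB (edges_by_source_id : List (Int × List (List (String × Int)))) :
    Nat → List Int → Int → PySem.Dict Int Int → PySem.Dict Int Int
  | _, [], _, dist => dist
  | 0, _ :: _, _, dist => dist
  | fuel+1, u :: frontier, depth, dist =>
      let s := (u :: frontier).foldl (fun s u => pvScanB edges_by_source_id depth u s)
        (dist, ([] : List Int))
      pvBFSB edges_by_source_id fuel s.2 (depth + 1) s.1

def compute_distances_to_target_alt (edges_by_source_id : List (Int × List (List (String × Int)))) (start_ids : List Int) (target_id : Option Int) : List (Int × Int) :=
  match target_id with
  | none => []
  | some t =>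
      let dist : PySem.Dict Int Int := PySem.Dict.empty.insert t 0
      (pvBFSB edges_by_source_id (1 + edges_by_source_id.length) [t] 0 dist).items

-- ===== PRECONDITION & SPEC =====
def Spec_compute_distances_to_target (edges_by_source_id : List (Int × List (List (String × Int)))) (start_ids : List Int) (target_id : Option Int) (out : List (Int × Int)) : Prop := out = compute_distances_to_target_alt edges_by_source_id start_ids target_id
instance (edges_by_source_id : List (Int × List (List (String × Int)))) (start_ids : List Int) (target_id : Option Int) (out : List (Int × Int)) : Decidable (Spec_compute_distances_to_target edges_by_source_id start_ids target_id out) := by unfold Spec_compute_distances_to_target; infer_instance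

-- ===== CLAIM (what is proved, stated in full; the proofs are below) =====
def Claim_equal_compute_distances_to_target : Prop := ∀ (edges_by_source_id : List (Int × List (List (String × Int)))) (start_ids : List Int) (target_id : Option Int), Dom_compute_distances_to_target edges_by_source_id start_ids target_id → Spec_compute_distances_to_target edges_by_source_id start_ids target_id (compute_distances_to_target edges_by_source_id start_ids target_id)

-- ===== LEMMAS AND PROOFS =====

-- the list of predecessors of u, in edge-table order — the common shape both programs traverse
def pvPreds (E : List (Int × List (List (String × Int)))) (u : Int) : List Int :=
  E.flatMap (fun p => p.2.filterMap (fun e =>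
    match pvDest e with
    | some did => if did = u then some p.1 else none
    | none => none))

-- the one-neighbour discovery step at a known depth
def pvStep (depth : Int) (s : PySem.Dict Int Int × List Int) (v : Int) : PySem.Dict Int Int × List Int :=
  if (s.1.get? v).isNone then (s.1.insert v (depth + 1), s.2 ++ [v]) else s

-- A's one-neighbour step (reads dist[u] from the dict)
def pvStepA (u : Int) (s : PySem.Dict Int Int × List Int) (v : Int) : PySem.Dict Int Int × List Int :=
  if (s.1.get? v).isNone then (s.1.insert v (s.1.getD u 0 + 1), s.2 ++ [v]) else s

-- processing a whole frontier F
def pvLevel (E : List (Int × List (List (String × Int)))) (depth : Int) (F : List Int)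
    (s : PySem.Dict Int Int × List Int) : PySem.Dict Int Int × List Int :=
  F.foldl (fun s u => (pvPreds E u).foldl (pvStep depth) s) s

-- number of still-undiscovered source nodes (the fuel measure)
def pvUnd (E : List (Int × List (List (String × Int)))) (d : PySem.Dict Int Int) : Nat :=
  ((E.map (·.1)).toFinset \ d.keys.toFinset).card

-- one (src, arr) scan of B is the pvStep fold over that pair's matching edges
theorem scanB_inner (depth u src : Int) (arr : List (List (String × Int))) (s : PySem.Dict Int Int × List Int) :
    arr.foldl (fun (s : PySem.Dict Int Int × List Int) e =>
      match pvDest e with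
      | some did =>
          if did = u then
            (if (s.1.get? src).isNone then (s.1.insert src (depth + 1), s.2 ++ [src]) else s)
          else s
      | none => s) s
    = (arr.filterMap (fun e =>
        match pvDest e with
        | some did => if did = u then some src else none
        | none => none)).foldl (pvStep depth) s := by
  induction arr generalizing s with
  | nil => rfl
  | cons e arr ih =>
      simp only [List.foldl, List.filterMap_cons]
      cases hdest : pvDest e with
      | none => exact ih s
      | some did =>
          by_cases hu : did = u
          · simp only [if_pos hu, List.foldl]
            rw [ih]
            rfl
          · simp only [if_neg hu]
            exact ih s

-- B's raw scan IS the pvStep fold over the predecessor list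
theorem scanB_eq_preds (E : List (Int × List (List (String × Int)))) (depth : Int) (u : Int)
    (s : PySem.Dict Int Int × List Int) :
    pvScanB E depth u s = (pvPreds E u).foldl (pvStep depth) s := by
  induction E generalizing s with
  | nil => rfl
  | cons p E ih =>
      simp only [pvScanB, pvPreds, List.flatMap_cons, List.foldl_append, List.foldl] at *
      rw [scanB_inner depth u p.1 p.2 s, ih]

-- rev-building inner loop: the effect of one (src, arr) pair on rev.getD u []
theorem rev_inner_getD (src : Int) (arr : List (List (String × Int))) (rev : PySem.Dict Int (List Int)) (u : Int) :
    (arr.foldl (fun rev e =>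
      match pvDest e with
      | some did => rev.modify did [] (fun l => l ++ [src])
      | none => rev) rev).getD u []
    = rev.getD u [] ++ arr.filterMap (fun e =>
        match pvDest e with
        | some did => if did = u then some src else none
        | none => none) := by
  induction arr generalizing rev with
  | nil => simp
  | cons e arr ih =>
      simp only [List.foldl, List.filterMap_cons]
      cases hdest : pvDest e with
      | none => simp [ih]
      | some did =>
          by_cases hu : did = u
          · subst hu
            rw [ih, PySem.Dict.getD_modify_self]
            simp
          · rw [ih, PySem.Dict.getD_modify_of_ne]
            · simp [hu]
            · exact fun h => hu h.symm

-- A's reverse adjacency looked up at u is exactly the predecessor list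
theorem rev_getD_eq_preds (E : List (Int × List (List (String × Int)))) (u : Int) :
    (pvRev E).getD u [] = pvPreds E u := by
  suffices h : ∀ (d : PySem.Dict Int (List Int)),
      (E.foldl (fun rev p =>
        p.2.foldl (fun rev e =>
          match pvDest e with
          | some did => rev.modify did [] (fun l => l ++ [p.1])
          | none => rev) rev) d).getD u [] = d.getD u [] ++ pvPreds E u by
    have := h PySem.Dict.empty
    simpa [pvRev, PySem.Dict.getD_empty] using this
  induction E with
  | nil => intro d; simp [pvPreds]
  | cons p E ih =>
      intro d
      simp only [List.foldl, pvPreds, List.flatMap_cons] at *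
      rw [ih, rev_inner_getD]
      simp [List.append_assoc]

-- predecessors are sources of the edge table
theorem mem_sources_of_mem_preds (E : List (Int × List (List (String × Int)))) (u v : Int)
    (h : v ∈ pvPreds E u) : v ∈ E.map (·.1) := by
  rcases List.mem_flatMap.mp h with ⟨p, hp, hv⟩
  rcases List.mem_filterMap.mp hv with ⟨e, _, he⟩
  have : v = p.1 := by
    cases hdest : pvDest e with
    | none => simp [hdest] at he
    | some did =>
        simp only [hdest] at he
        by_cases hu : did = u
        · rw [if_pos hu] at he; exact (Option.some.inj he).symm
        · rw [if_neg hu] at he; cases he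
  subst this
  exact List.mem_map.mpr ⟨p, hp, rfl⟩

theorem pvBFSA_cons (rev : PySem.Dict Int (List Int)) (fuel : Nat) (u : Int) (dq : List Int) (dist : PySem.Dict Int Int) :
    pvBFSA rev (fuel + 1) (u :: dq) dist
      = pvBFSA rev fuel ((rev.getD u []).foldl (pvStepA u) (dist, dq)).2 ((rev.getD u []).foldl (pvStepA u) (dist, dq)).1 := rfl

theorem pvBFSB_cons (E : List (Int × List (List (String × Int)))) (fuel : Nat) (u : Int) (F : List Int) (depth : Int) (dist : PySem.Dict Int Int) :
    pvBFSB E (fuel + 1) (u :: F) depth dist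
      = pvBFSB E fuel (pvLevel E depth (u :: F) (dist, [])).2 (depth + 1) (pvLevel E depth (u :: F) (dist, [])).1 := by
  show pvBFSB E fuel ((u :: F).foldl (fun s u => pvScanB E depth u s) (dist, [])).2 (depth + 1)
        ((u :: F).foldl (fun s u => pvScanB E depth u s) (dist, [])).1
      = _
  have h : (fun (s : PySem.Dict Int Int × List Int) u => pvScanB E depth u s)
      = (fun s u => (pvPreds E u).foldl (pvStep depth) s) := by
    funext s u; exact scanB_eq_preds E depth u s
  rw [h]; rfl

theorem pvBFSA_nil (rev : PySem.Dict Int (List Int)) (fuel : Nat) (dist : PySem.Dict Int Int) :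
    pvBFSA rev fuel [] dist = dist := by cases fuel <;> rfl

theorem pvBFSB_nil (E : List (Int × List (List (String × Int)))) (fuel : Nat) (depth : Int) (dist : PySem.Dict Int Int) :
    pvBFSB E fuel [] depth dist = dist := by cases fuel <;> rfl

-- the acc component is only appended to: a common prefix factors out
theorem foldl_step_prefix (depth : Int) (l : List Int) (d : PySem.Dict Int Int) (x a : List Int) :
    l.foldl (pvStep depth) (d, x ++ a) = ((l.foldl (pvStep depth) (d, a)).1, x ++ (l.foldl (pvStep depth) (d, a)).2) := by
  induction l generalizing d a with
  | nil => rfl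
  | cons v l ih =>
      simp only [List.foldl, pvStep]
      by_cases h : (d.get? v).isNone
      · simp only [h, if_true]
        rw [show (x ++ a) ++ [v] = x ++ (a ++ [v]) by simp, ih]
      · rw [if_neg h, if_neg h]
        exact ih d a

-- existing bindings are never overwritten
theorem foldl_step_get?_mono (depth : Int) (l : List Int) (d : PySem.Dict Int Int) (a : List Int)
    (k : Int) (x : Int) (h : d.get? k = some x) :
    (l.foldl (pvStep depth) (d, a)).1.get? k = some x := by
  induction l generalizing d a with
  | nil => exact h
  | cons v l ih =>
      simp only [List.foldl, pvStep]
      by_cases hv : (d.get? v).isNone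
      · simp only [hv, if_true]
        refine ih _ _ ?_
        have hne : k ≠ v := by
          intro he; subst he; rw [h] at hv; simp at hv
        rw [PySem.Dict.get?_insert_of_ne _ _ hne]; exact h
      · rw [if_neg hv]; exact ih d a h

-- A's inner loop equals the known-depth one once dist[u] = depth
theorem foldl_stepA_eq (u : Int) (depth : Int) (l : List Int) (d : PySem.Dict Int Int) (a : List Int)
    (hu : d.get? u = some depth) :
    l.foldl (pvStepA u) (d, a) = l.foldl (pvStep depth) (d, a) := by
  induction l generalizing d a with
  | nil => rfl
  | cons v l ih =>
      simp only [List.foldl, pvStepA, pvStep]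
      by_cases hv : (d.get? v).isNone
      · simp only [hv, if_true]
        have hd : d.getD u 0 = depth := by
          rw [PySem.Dict.getD_eq_get?_getD, hu]; rfl
        rw [hd]
        refine ih _ _ ?_
        have hne : u ≠ v := by
          intro he; subst he; rw [hu] at hv; simp at hv
        rw [PySem.Dict.get?_insert_of_ne _ _ hne]; exact hu
      · rw [if_neg hv, if_neg hv]; exact ih d a hu

-- newly accumulated nodes carry value depth+1
theorem foldl_step_acc_mem (depth : Int) (l : List Int) (d : PySem.Dict Int Int) (a : List Int) :
    ∀ v ∈ (l.foldl (pvStep depth) (d, a)).2, v ∈ a ∨ (l.foldl (pvStep depth) (d, a)).1.get? v = some (depth + 1) := by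
  induction l generalizing d a with
  | nil => intro v hv; exact Or.inl hv
  | cons w l ih =>
      simp only [List.foldl, pvStep]
      by_cases hw : (d.get? w).isNone
      · simp only [hw, if_true]
        intro v hv
        rcases ih (d.insert w (depth + 1)) (a ++ [w]) v hv with h | h
        · rcases List.mem_append.mp h with h | h
          · exact Or.inl h
          · right
            have hv' : v = w := by simpa using h
            subst hv'
            exact foldl_step_get?_mono depth l _ _ v (depth + 1) (PySem.Dict.get?_insert_self _ _ _)
        · exact Or.inr h
      · rw [if_neg hw]; exact ih d a

-- inserting a fresh source key strictly shrinks the measure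
theorem und_insert (E : List (Int × List (List (String × Int)))) (d : PySem.Dict Int Int) (v w : Int)
    (hv : v ∈ E.map (·.1)) (h : d.get? v = none) :
    pvUnd E (d.insert v w) + 1 ≤ pvUnd E d := by
  have hc : d.contains v = false := (PySem.Dict.get?_eq_none_iff_contains _ _).mp h
  have hk : (d.insert v w).keys = d.keys ++ [v] := PySem.Dict.keys_insert_of_not_contains _ _ hc
  have hnm : v ∉ d.keys := by
    intro hm
    rw [(PySem.Dict.contains_iff_mem_keys _ _).mpr hm] at hc
    simp at hc
  have hmem : v ∈ (E.map (·.1)).toFinset \ d.keys.toFinset := by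
    simp [List.mem_toFinset, hv, hnm]
  unfold pvUnd
  rw [hk]
  have ht : (d.keys ++ [v]).toFinset = insert v d.keys.toFinset := by
    simp [List.toFinset_append, Finset.union_comm]
  rw [ht, Finset.sdiff_insert, Finset.card_erase_of_mem hmem]
  have hpos : 0 < ((E.map (·.1)).toFinset \ d.keys.toFinset).card := Finset.card_pos.mpr ⟨v, hmem⟩
  omega

-- measure accounting along the inner loop
theorem foldl_step_und (E : List (Int × List (List (String × Int)))) (depth : Int) (l : List Int)
    (d : PySem.Dict Int Int) (a : List Int) (hl : ∀ v ∈ l, v ∈ E.map (·.1)) :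
    pvUnd E (l.foldl (pvStep depth) (d, a)).1 + (l.foldl (pvStep depth) (d, a)).2.length
      ≤ pvUnd E d + a.length := by
  induction l generalizing d a with
  | nil => simp
  | cons v l ih =>
      simp only [List.foldl, pvStep]
      by_cases hv : (d.get? v).isNone
      · simp only [hv, if_true]
        have h1 := und_insert E d v (depth + 1) (hl v (List.mem_cons_self ..)) (Option.isNone_iff_eq_none.mp hv)
        have h2 := ih (d.insert v (depth + 1)) (a ++ [v]) (fun w hw => hl w (List.mem_cons_of_mem _ hw))
        simp only [List.length_append, List.length_cons, List.length_nil] at h2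
        omega
      · rw [if_neg hv]
        exact ih d a (fun w hw => hl w (List.mem_cons_of_mem _ hw))

-- pvLevel versions of the three fold facts, over an arbitrary state pair s
theorem pvLevel_get?_mono (E : List (Int × List (List (String × Int)))) (depth : Int) (F : List Int) :
    ∀ (s : PySem.Dict Int Int × List Int) (k x : Int), s.1.get? k = some x →
      (pvLevel E depth F s).1.get? k = some x := by
  induction F with
  | nil => intro s k x h; exact h
  | cons u F ih =>
      intro s k x h
      have h' := foldl_step_get?_mono depth (pvPreds E u) s.1 s.2 k x h
      rw [Prod.mk.eta] at h'
      exact ih _ k x h'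

theorem pvLevel_acc_mem (E : List (Int × List (List (String × Int)))) (depth : Int) (F : List Int) :
    ∀ (s : PySem.Dict Int Int × List Int), ∀ v ∈ (pvLevel E depth F s).2,
      v ∈ s.2 ∨ (pvLevel E depth F s).1.get? v = some (depth + 1) := by
  induction F with
  | nil => intro s v hv; exact Or.inl hv
  | cons u F ih =>
      intro s v hv
      have hv' : v ∈ (pvLevel E depth F ((pvPreds E u).foldl (pvStep depth) s)).2 := hv
      rcases ih _ v hv' with h | h
      · have hbase := foldl_step_acc_mem depth (pvPreds E u) s.1 s.2 v (by rw [Prod.mk.eta]; exact h)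
        rcases hbase with h' | h'
        · exact Or.inl h'
        · right
          rw [Prod.mk.eta] at h'
          exact pvLevel_get?_mono E depth F _ v (depth + 1) h'
      · exact Or.inr h

theorem pvLevel_und (E : List (Int × List (List (String × Int)))) (depth : Int) (F : List Int) :
    ∀ (s : PySem.Dict Int Int × List Int),
      pvUnd E (pvLevel E depth F s).1 + (pvLevel E depth F s).2.length
        ≤ pvUnd E s.1 + s.2.length := by
  induction F with
  | nil => intro s; exact le_refl _
  | cons u F ih =>
      intro s
      have h1 := foldl_step_und E depth (pvPreds E u) s.1 s.2 (fun v hv => mem_sources_of_mem_preds E u v hv)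
      rw [Prod.mk.eta] at h1
      have h2 := ih ((pvPreds E u).foldl (pvStep depth) s)
      have hg : pvLevel E depth (u :: F) s = pvLevel E depth F ((pvPreds E u).foldl (pvStep depth) s) := rfl
      rw [hg]
      omega

-- A's deque BFS processes one whole level exactly like pvLevel
theorem bfsA_level (E : List (Int × List (List (String × Int)))) (depth : Int) :
    ∀ (F rest : List Int) (d : PySem.Dict Int Int) (fa : Nat),
      (∀ u ∈ F, d.get? u = some depth) →
      pvBFSA (pvRev E) (F.length + fa) (F ++ rest) d
        = pvBFSA (pvRev E) fa (pvLevel E depth F (d, rest)).2 (pvLevel E depth F (d, rest)).1 := by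
  intro F
  induction F with
  | nil => intro rest d fa _; simp [pvLevel]
  | cons u F ih =>
      intro rest d fa hF
      have hu : d.get? u = some depth := hF u (List.mem_cons_self ..)
      have hstep : (u :: F).length + fa = (F.length + fa) + 1 := by simp; omega
      rw [hstep, show (u :: F) ++ rest = u :: (F ++ rest) from rfl, pvBFSA_cons,
          rev_getD_eq_preds E u, foldl_stepA_eq u depth _ d (F ++ rest) hu]
      have hsplit : (pvPreds E u).foldl (pvStep depth) (d, F ++ rest)
          = (((pvPreds E u).foldl (pvStep depth) (d, rest)).1,
             F ++ ((pvPreds E u).foldl (pvStep depth) (d, rest)).2) := foldl_step_prefix depth _ d F rest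
      rw [hsplit]
      have hF' : ∀ w ∈ F, ((pvPreds E u).foldl (pvStep depth) (d, rest)).1.get? w = some depth := by
        intro w hw
        exact foldl_step_get?_mono depth _ d rest w depth (hF w (List.mem_cons_of_mem _ hw))
      rw [ih ((pvPreds E u).foldl (pvStep depth) (d, rest)).2
             ((pvPreds E u).foldl (pvStep depth) (d, rest)).1 fa hF']
      rfl

-- the main lockstep lemma: with sufficient fuel, deque BFS = index-free level BFS
theorem bfs_main (E : List (Int × List (List (String × Int)))) :
    ∀ (fb fa : Nat) (F : List Int) (d : PySem.Dict Int Int) (depth : Int),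
      (∀ u ∈ F, d.get? u = some depth) →
      pvUnd E d + F.length ≤ fa → pvUnd E d + F.length ≤ fb →
      pvBFSA (pvRev E) fa F d = pvBFSB E fb F depth d := by
  intro fb
  induction fb with
  | zero =>
      intro fa F d depth _ _ hb
      have hF0 : F = [] := by
        cases F with
        | nil => rfl
        | cons u F => simp at hb
      subst hF0
      rw [pvBFSA_nil, pvBFSB_nil]
  | succ fb ih =>
      intro fa F d depth hF ha hb
      cases F with
      | nil => rw [pvBFSA_nil, pvBFSB_nil]
      | cons u F =>
          obtain ⟨fa', hfa⟩ : ∃ fa', fa = (u :: F).length + fa' :=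
            ⟨fa - (u :: F).length, by simp at ha ⊢; omega⟩
          subst hfa
          have hA := bfsA_level E depth (u :: F) [] d fa' hF
          rw [List.append_nil] at hA
          rw [hA, pvBFSB_cons]
          have hmem : ∀ v ∈ (pvLevel E depth (u :: F) (d, [])).2,
              (pvLevel E depth (u :: F) (d, [])).1.get? v = some (depth + 1) := by
            intro v hv
            rcases pvLevel_acc_mem E depth (u :: F) (d, []) v hv with h | h
            · exact absurd h (by simp)
            · exact h
          have hund := pvLevel_und E depth (u :: F) (d, [])
          simp only [List.length_nil] at hund
          refine ih fa' _ _ (depth + 1) hmem ?_ ?_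
          · simp only [List.length_cons] at ha ⊢; omega
          · simp only [List.length_cons] at hb ⊢; omega

-- ===== VERDICT (by name: the statement is the Claim_ definition above) =====
theorem compute_distances_to_target_spec : Claim_equal_compute_distances_to_target := by
  intro edges start_ids target_id _hdom
  unfold Spec_compute_distances_to_target compute_distances_to_target compute_distances_to_target_alt
  cases target_id with
  | none => rfl
  | some t =>
      simp only
      set d0 : PySem.Dict Int Int := PySem.Dict.empty.insert t 0 with hd0
      have hF : ∀ u ∈ ([t] : List Int), d0.get? u = some 0 := by
        intro u hu
        have : u = t := by simpa using hu
        subst this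
        exact PySem.Dict.get?_insert_self _ _ _
      have hbound : pvUnd edges d0 + ([t] : List Int).length ≤ 1 + edges.length := by
        have h1 : pvUnd edges d0 ≤ (edges.map (·.1)).toFinset.card :=
          Finset.card_le_card (Finset.sdiff_subset)
        have h2 : (edges.map (·.1)).toFinset.card ≤ (edges.map (·.1)).length :=
          List.toFinset_card_le _
        simp only [List.length_cons, List.length_nil, List.length_map] at *
        omega
      rw [bfs_main edges (1 + edges.length) (1 + edges.length) [t] d0 0 hF hbound hbound]
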